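-- pv_equiv track=rewrite | github.com/salitha-gunawardhana-99/thakshana-botan-library | T1 Q1,2,3 - Install botan/Botan-3.5.0/src/scripts/dev_tools/gen_mp_comba.py | comba_indexes
-- ===== SOURCE A (Python) =====
-- def comba_indexes(N):
--
--     indexes = []
--
--     for i in range(0, 2*N):
--         x = []
--
--         for j in range(max(0, i-N+1), min(N, i+1)):
--             x += [(j,i-j)]
--         indexes += [sorted(x)]
--
--     return indexes
-- ===== SOURCE B (Python) =====
-- def comba_indexes(N):
--     indexes = [[] for _ in range(2 * N)]
--     for a in range(N):
--         for b in range(N):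
--             indexes[a + b].append((a, b))
--     return indexes
-- ===== Notes on version B (the rewrite author's own statement) =====
-- stated objective: simpler
-- what changed: Instead of computing each diagonal's clipped j-range with max/min and sorting every bucket, B pre-allocates twice-N empty buckets and distributes each pair (a,b) into bucket a+b in one nested pass; outer iteration over a keeps every bucket sorted without calling sorted.
import Mathlib
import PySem

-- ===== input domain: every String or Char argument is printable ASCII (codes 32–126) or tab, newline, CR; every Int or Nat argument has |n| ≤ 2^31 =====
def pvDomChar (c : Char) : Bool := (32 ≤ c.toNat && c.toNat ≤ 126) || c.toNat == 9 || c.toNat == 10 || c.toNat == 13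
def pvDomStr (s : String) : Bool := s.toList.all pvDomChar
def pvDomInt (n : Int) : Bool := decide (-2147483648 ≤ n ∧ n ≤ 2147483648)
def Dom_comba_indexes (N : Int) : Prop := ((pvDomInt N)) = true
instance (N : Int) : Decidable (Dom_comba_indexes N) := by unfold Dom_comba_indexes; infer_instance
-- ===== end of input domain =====

-- B replaces A's per-diagonal range clipping plus per-bucket sort by a single nested
-- distribution pass into pre-allocated buckets (simpler; same return value).


-- ===== PORT A =====
def comba_indexes (N : Int) : List (List (Int × Int)) :=
  (PySem.List.pyRange 0 (2*N) 1).foldl (fun indexes i =>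
    let x := (PySem.List.pyRange (max 0 (i - N + 1)) (min N (i + 1)) 1).foldl
      (fun x j => x ++ [(j, i - j)]) ([] : List (Int × Int))
    indexes ++ [PySem.List.sorted2 x Prod.fst Prod.snd]) []

-- ===== PORT B =====
-- indexes[a + b].append((a, b)): a, b come from range(N), so a + b ≥ 0 and
-- (a + b).toNat is exactly Python's nonnegative index.
def comba_indexes_alt (N : Int) : List (List (Int × Int)) :=
  let init := (PySem.List.pyRange 0 (2*N) 1).map (fun _ => ([] : List (Int × Int)))
  (PySem.List.pyRange 0 N 1).foldl (fun indexes a =>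
    (PySem.List.pyRange 0 N 1).foldl (fun indexes b =>
      indexes.set (a + b).toNat (indexes.getD (a + b).toNat [] ++ [(a, b)])) indexes) init

-- ===== PRECONDITION & SPEC =====
def Spec_comba_indexes (N : Int) (out : List (List (Int × Int))) : Prop := out = comba_indexes_alt N
instance (N : Int) (out : List (List (Int × Int))) : Decidable (Spec_comba_indexes N out) := by unfold Spec_comba_indexes; infer_instance

-- ===== CLAIM (what is proved, stated in full; the proofs are below) =====
def Claim_equal_comba_indexes : Prop := ∀ (N : Int), Dom_comba_indexes N → Spec_comba_indexes N (comba_indexes N)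

-- ===== LEMMAS AND PROOFS =====

-- A's per-diagonal bucket, with the first coordinate bounded by M instead of N.
def bktm (M N i : Int) : List (Int × Int) :=
  (PySem.List.pyRange (max 0 (i - N + 1)) (min M (i + 1)) 1).map (fun j => (j, i - j))

-- sorted(x) is the identity on a list whose first components strictly increase.
theorem foldl_insertBy_fst_lt (xs acc : List (Int × Int))
    (hacc : acc.Pairwise (fun p q => p.1 < q.1))
    (hx : xs.Pairwise (fun p q => p.1 < q.1))
    (hcross : ∀ p ∈ acc, ∀ q ∈ xs, p.1 < q.1) :
    xs.foldl (fun acc x => PySem.List.insertBy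
      (fun a b => decide (a.1 < b.1) || (!decide (b.1 < a.1) && decide (a.2 < b.2))) x acc) acc
      = acc ++ xs := by
  induction xs generalizing acc with
  | nil => simp
  | cons y t ih =>
    have hins : PySem.List.insertBy
        (fun a b => decide (a.1 < b.1) || (!decide (b.1 < a.1) && decide (a.2 < b.2))) y acc
        = acc ++ [y] := by
      apply PySem.List.insertBy_of_forall_not_before
      intro z hz
      have h1 : z.1 < y.1 := hcross z hz y (by simp)
      simp [not_lt.mpr (le_of_lt h1), h1]
    rw [List.foldl_cons, hins, ih (acc ++ [y])]
    · simp
    · rw [List.pairwise_append]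
      refine ⟨hacc, by simp, ?_⟩
      intro p hp q hq
      have hq' : q = y := by simpa using hq
      rw [hq']
      exact hcross p hp y (by simp)
    · exact (List.pairwise_cons.mp hx).2
    · intro p hp q hq
      rcases List.mem_append.mp hp with h | h
      · exact hcross p h q (List.mem_cons_of_mem _ hq)
      · have h' : p = y := by simpa using h
        rw [h']
        exact (List.pairwise_cons.mp hx).1 q hq

theorem sorted2_fst_lt_eq_self (xs : List (Int × Int))
    (h : xs.Pairwise (fun p q => p.1 < q.1)) :
    PySem.List.sorted2 xs Prod.fst Prod.snd = xs := by
  show xs.foldl _ [] = xs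
  simpa using foldl_insertBy_fst_lt xs [] (by simp) h (by simp)

-- A equals the map of buckets.
theorem portA_eq_map (N : Int) :
    comba_indexes N = (PySem.List.pyRange 0 (2*N) 1).map (fun i => bktm N N i) := by
  unfold comba_indexes
  rw [PySem.List.foldl_append_singleton_eq_map]
  simp only [List.nil_append]
  apply List.map_congr_left
  intro i _
  rw [PySem.List.foldl_append_singleton_eq_map]
  simp only [List.nil_append]
  apply sorted2_fst_lt_eq_self
  exact List.Pairwise.map _ (fun a b h => h) (PySem.List.pairwise_lt_pyRange_one _ _)

-- B's inner loop over Nat indices.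
def innerF (A n : Nat) (xs : List (List (Int × Int))) : List (List (Int × Int)) :=
  (List.range n).foldl (fun idx b => idx.set (A + b) (idx.getD (A + b) [] ++ [((A : Int), (b : Int))])) xs

theorem innerF_succ (A n : Nat) (xs : List (List (Int × Int))) :
    innerF A (n+1) xs = (innerF A n xs).set (A + n)
      ((innerF A n xs).getD (A + n) [] ++ [((A : Int), (n : Int))]) := by
  unfold innerF
  rw [List.range_succ, List.foldl_append]
  rfl

theorem innerF_length (A n : Nat) (xs : List (List (Int × Int))) :
    (innerF A n xs).length = xs.length := by
  induction n with
  | zero => rfl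
  | succ n ih => rw [innerF_succ]; simp [ih]

theorem innerF_getD (A n : Nat) (xs : List (List (Int × Int)))
    (hbound : A + n ≤ xs.length) (k : Nat) (hk : k < xs.length) :
    (innerF A n xs).getD k []
      = xs.getD k [] ++ (if A ≤ k ∧ k < A + n then [((A : Int), (k : Int) - (A : Int))] else []) := by
  induction n generalizing k with
  | zero =>
    simp [innerF]
  | succ n ih =>
    have hb' : A + n ≤ xs.length := by omega
    have hAn : A + n < xs.length := by omega
    have hgetD : (innerF A n xs).getD (A + n) [] = xs.getD (A + n) [] := by
      rw [ih hb' (A+n) hAn]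
      simp
    rw [innerF_succ, hgetD]
    by_cases hkeq : k = A + n
    · subst hkeq
      rw [List.getD_eq_getElem?_getD,
          List.getElem?_set_self (by rw [innerF_length]; omega)]
      have h1 : A ≤ A + n ∧ A + n < A + (n+1) := by omega
      simp [h1]
    · rw [List.getD_eq_getElem?_getD, List.getElem?_set_ne (by omega),
          ← List.getD_eq_getElem?_getD, ih hb' k hk]
      by_cases hc : A ≤ k ∧ k < A + n
      · have h1 : A ≤ k ∧ k < A + (n+1) := by omega
        simp [hc, h1]
      · have h1 : ¬ (A ≤ k ∧ k < A + (n+1)) := by omega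
        simp [hc, h1]

-- Bridge: the port's inner loop (over pyRange, Int indices) is innerF.
theorem inner_bridge (A n : Nat) (xs : List (List (Int × Int))) :
    (PySem.List.pyRange 0 (n : Int) 1).foldl (fun idx b =>
        idx.set ((A : Int) + b).toNat (idx.getD ((A : Int) + b).toNat [] ++ [((A : Int), b)])) xs
      = innerF A n xs := by
  rw [PySem.List.pyRange_one]
  have h1 : ((n : Int) - 0).toNat = n := by omega
  rw [h1, List.foldl_map]
  unfold innerF
  apply List.foldl_ext
  intro idx b _
  have h3 : ((A : Int) + (b : Int)).toNat = A + b := by omega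
  simp [h3]

-- B's outer loop over Nat.
def outF (n m : Nat) : List (List (Int × Int)) :=
  (List.range m).foldl (fun idx A => innerF A n idx) ((List.range (2*n)).map (fun _ => []))

theorem outF_succ (n m : Nat) : outF n (m+1) = innerF m n (outF n m) := by
  unfold outF
  rw [List.range_succ, List.foldl_append]
  rfl

theorem outF_length (n m : Nat) : (outF n m).length = 2*n := by
  induction m with
  | zero => simp [outF]
  | succ m ih => rw [outF_succ, innerF_length]; exact ih

theorem outF_getD (n m : Nat) (hm : m ≤ n) (k : Nat) (hk : k < 2*n) :
    (outF n m).getD k [] = bktm (m : Int) (n : Int) (k : Int) := by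
  induction m with
  | zero =>
    have hnil : PySem.List.pyRange (max 0 ((k:Int) - n + 1)) (min 0 ((k:Int) + 1)) 1 = [] := by
      apply PySem.List.pyRange_one_eq_nil
      omega
    simp only [outF, List.range_zero, List.foldl_nil, bktm, Nat.cast_zero, hnil, List.map_nil]
    rw [List.getD_eq_getElem?_getD]
    simp
  | succ m ih =>
    have hm' : m ≤ n := by omega
    have hb : m + n ≤ (outF n m).length := by rw [outF_length]; omega
    rw [outF_succ, innerF_getD m n _ hb k (by rw [outF_length]; exact hk), ih hm']
    unfold bktm
    by_cases hc : m ≤ k ∧ k < m + n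
    · have hmin1 : min (m : Int) ((k:Int) + 1) = (m : Int) := by omega
      have hmin2 : min ((m:Int) + 1) ((k:Int) + 1) = (m:Int) + 1 := by omega
      have hle : max 0 ((k:Int) - n + 1) ≤ (m : Int) := by omega
      have hsplit := PySem.List.pyRange_one_succ_right hle
      push_cast
      rw [hmin1, hmin2, hsplit]
      simp [hc]
    · have heq : min ((m:Int) + 1) ((k:Int) + 1) = min (m:Int) ((k:Int) + 1)
          ∨ (PySem.List.pyRange (max 0 ((k:Int) - n + 1)) (min ((m:Int)+1) ((k:Int)+1)) 1 = []
             ∧ PySem.List.pyRange (max 0 ((k:Int) - n + 1)) (min (m:Int) ((k:Int)+1)) 1 = []) := by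
        by_cases hk2 : k < m
        · left; omega
        · right
          constructor <;> (apply PySem.List.pyRange_one_eq_nil; omega)
      push_cast
      rcases heq with h | ⟨h1, h2⟩
      · rw [h]; simp [hc]
      · rw [h1, h2]; simp [hc]

-- Bridge: B's port equals outF for N ≥ 0 with n = N.toNat.
theorem portB_eq_outF (N : Int) (hN : 0 ≤ N) :
    comba_indexes_alt N = outF N.toNat N.toNat := by
  unfold comba_indexes_alt
  have hn : (N : Int) = (N.toNat : Int) := by omega
  have hinit : (PySem.List.pyRange 0 (2*N) 1).map (fun _ => ([] : List (Int × Int)))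
      = (List.range (2*N.toNat)).map (fun _ => []) := by
    rw [PySem.List.pyRange_one]
    have h2 : (2*N - 0).toNat = 2*N.toNat := by omega
    rw [h2, List.map_map]
    rfl
  rw [hinit]
  have hstep : List.foldl (fun indexes a =>
        (PySem.List.pyRange 0 N 1).foldl (fun indexes b =>
          indexes.set (a + b).toNat (indexes.getD (a + b).toNat [] ++ [(a, b)])) indexes)
        ((List.range (2*N.toNat)).map (fun _ => [])) (PySem.List.pyRange 0 N 1)
      = List.foldl (fun indexes a => innerF a.toNat N.toNat indexes)
        ((List.range (2*N.toNat)).map (fun _ => [])) (PySem.List.pyRange 0 N 1) := by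
    apply List.foldl_ext
    intro idx a ha
    have ha' : 0 ≤ a ∧ a < N := PySem.List.mem_pyRange_one.mp ha
    have hcast : ((a.toNat : Int)) = a := by omega
    have := inner_bridge a.toNat N.toNat idx
    rw [hcast, ← hn] at this
    exact this
  rw [hstep, hn, PySem.List.pyRange_one]
  have h1 : ((N.toNat : Int) - 0).toNat = N.toNat := by omega
  rw [h1, List.foldl_map]
  unfold outF
  apply List.foldl_ext
  intro idx A _
  have h0 : ((0 : Int) + (A : Nat)).toNat = A := by omega
  rw [h0]

-- ===== VERDICT (by name: the statement is the Claim_ definition above) =====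
theorem comba_indexes_spec : Claim_equal_comba_indexes := by
  intro N _
  unfold Spec_comba_indexes
  by_cases hN : 0 ≤ N
  · rw [portA_eq_map, portB_eq_outF N hN]
    have hn : (N : Int) = (N.toNat : Int) := by omega
    apply List.ext_getElem
    · rw [outF_length, List.length_map, PySem.List.length_pyRange_one]
      omega
    · intro k h1 h2
      have hk : k < 2*N.toNat := by rw [outF_length] at h2; exact h2
      rw [← List.getD_eq_getElem _ [] h1, ← List.getD_eq_getElem _ [] h2,
          outF_getD N.toNat N.toNat (le_refl _) k hk,
          List.getD_eq_getElem _ [] h1, List.getElem_map, PySem.List.getElem_pyRange_one]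
      have h0 : (0 : Int) + (k : Int) = (k : Int) := by ring
      rw [h0, ← hn]
  · have h2N : PySem.List.pyRange 0 (2*N) 1 = [] :=
      PySem.List.pyRange_one_eq_nil (by omega)
    have hNr : PySem.List.pyRange 0 N 1 = [] :=
      PySem.List.pyRange_one_eq_nil (by omega)
    unfold comba_indexes comba_indexes_alt
    rw [h2N, hNr]
    simp
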